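-- pv_equiv track=rewrite | github.com/mosix11/Exploring-DoubleDescent | src/models/weight_norm_analysis.py | _group_keys_by_prefix
-- ===== SOURCE A (Python) =====
-- from collections import defaultdict, OrderedDict
-- from typing import Dict, Iterable, Tuple, List, Optional
--
-- def _group_keys_by_prefix(keys: Iterable[str], max_groups: int = 12) -> Dict[str, List[str]]:
--     keys = list(keys)
--     if len(keys) <= max_groups:
--         return {k: [k] for k in keys}
--
--     split_keys = [k.split(".") for k in keys]
--     depth = 1
--     while True:
--         groups = defaultdict(list)
--         for k, parts in zip(keys, split_keys):
--             prefix = ".".join(parts[:depth]) if len(parts) >= depth else k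
--             groups[prefix].append(k)
--         if len(groups) <= max_groups or depth > max(len(p) for p in split_keys):
--             if len(groups) > max_groups:
--                 items = sorted(groups.items(), key=lambda kv: len(kv[1]), reverse=True)
--                 kept = dict(items[:max_groups-1])
--                 merged_keys = []
--                 for _, v in items[max_groups-1:]:
--                     merged_keys.extend(v)
--                 kept["(others)"] = merged_keys
--                 return kept
--             return dict(groups)
--         depth += 1
-- ===== SOURCE B (Python) =====
-- def _group_keys_by_prefix(keys, max_groups=12):
--     keys = list(keys)
--     if len(keys) <= max_groups:
--         return {k: [k] for k in keys}
--     # Depth-1 grouping. Deeper splits only refine it, so if it already has too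
--     # many groups, every deeper grouping does too and A's loop falls through to
--     # per-distinct-key grouping; jump there directly.
--     g1 = {}
--     for k in keys:
--         g1.setdefault(k.split(".")[0], []).append(k)
--     if len(g1) <= max_groups:
--         return g1
--     by_key = {}
--     for k in keys:
--         by_key.setdefault(k, []).append(k)
--     items = sorted(by_key.items(), key=lambda kv: len(kv[1]), reverse=True)
--     kept = dict(items[:max_groups - 1])
--     kept["(others)"] = [k for _, v in items[max_groups - 1:] for k in v]
--     return kept
-- ===== Notes on version B (the rewrite author's own statement) =====
-- stated objective: faster
-- what changed: A regroups all keys once per depth level until the group count fits or depth exceeds the deepest key; B exploits that deepening only refines groups (the distinct-prefix count is monotone in depth), so it builds the depth-1 grouping once and, if that already exceeds max_groups, jumps directly to the per-distinct-key grouping and merges the smallest groups (intended as faster by dropping the per-depth passes; the bundled a timing run read 1.5x-3.8x on large random inputs).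
-- outside the precondition, e.g. on _group_keys_by_prefix([], -1): A raises ValueError, B returns {'(others)': []}
import Mathlib
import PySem

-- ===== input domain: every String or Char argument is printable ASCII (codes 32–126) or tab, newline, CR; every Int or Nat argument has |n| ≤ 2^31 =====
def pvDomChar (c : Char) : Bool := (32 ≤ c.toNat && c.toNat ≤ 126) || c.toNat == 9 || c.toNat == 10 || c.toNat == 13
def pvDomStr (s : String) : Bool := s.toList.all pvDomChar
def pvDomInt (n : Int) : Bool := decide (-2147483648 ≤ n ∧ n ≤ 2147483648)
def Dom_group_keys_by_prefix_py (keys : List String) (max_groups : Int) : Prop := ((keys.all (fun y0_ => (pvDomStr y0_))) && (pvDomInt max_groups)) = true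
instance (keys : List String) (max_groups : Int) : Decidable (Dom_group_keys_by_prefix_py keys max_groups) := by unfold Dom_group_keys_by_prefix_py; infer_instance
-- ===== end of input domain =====

-- B groups once at depth 1 and, if that is already too fine, jumps straight to the
-- per-distinct-key grouping that A's deepening loop necessarily ends in (grouping only
-- refines as depth grows), skipping A's per-depth regrouping passes.

-- ===== PORT A =====
-- k.split("."): the separator "." is nonempty, so Python's split is exactly Chars.splitOn
-- (PySem.Str.split? returns `some` of precisely this list).
def pvSplitDot (k : String) : List String :=
  (PySem.Chars.splitOn k.toList ['.']).map String.ofList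

-- ".".join(parts[:depth]) if len(parts) >= depth else k
def pvPrefixA (k : String) (parts : List String) (depth : Int) : String :=
  if depth ≤ (parts.length : Int) then PySem.Str.join "." (PySem.List.slice parts none (some depth)) else k

-- dict(pairs) on pairs with distinct keys (shared by both ports: both call dict(...))
def pvDictOfPairs (pairs : List (String × List String)) : PySem.Dict String (List String) :=
  pairs.foldl (fun d kv => d.insert kv.1 kv.2) PySem.Dict.empty

-- the `while True:` loop of A; `depth` starts at 1
def pvLoopA (keys : List String) (split_keys : List (List String)) (max_groups : Int) (depth : Int) :
    List (String × List String) :=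
  let groups := (keys.zip split_keys).foldl
      (fun d kp => d.modify (pvPrefixA kp.1 kp.2 depth) [] (· ++ [kp.1])) PySem.Dict.empty
  if (groups.size : Int) ≤ max_groups then
    groups.items
  else
    match hm : PySem.List.max? (split_keys.map fun p => (p.length : Int)) (fun x => x) with
    | none => []   -- Python: max() of an empty sequence raises ValueError here; outside Pre_
    | some m =>
      if m < depth then
        let items := PySem.List.sorted groups.items (fun kv => (kv.2.length : Int)) true
        let kept := pvDictOfPairs (PySem.List.slice items none (some (max_groups - 1)))
        let merged := (PySem.List.slice items (some (max_groups - 1)) none).foldl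
            (fun acc kv => acc ++ kv.2) ([] : List String)
        (kept.insert "(others)" merged).items
      else pvLoopA keys split_keys max_groups (depth + 1)
termination_by (((PySem.List.max? (split_keys.map fun p => (p.length : Int)) (fun x => x)).getD 0 + 1) - depth).toNat
decreasing_by simp only [Option.getD, hm]; omega

def group_keys_by_prefix_py (keys : List String) (max_groups : Int) : List (String × List String) :=
  if (keys.length : Int) ≤ max_groups then
    (keys.foldl (fun d k => d.insert k [k]) PySem.Dict.empty).items
  else
    pvLoopA keys (keys.map pvSplitDot) max_groups 1

-- ===== PORT B =====
-- k.split(".")[0]; the split list is never empty, so pyGet? is never none ("" is a dead default)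
def pvHeadDot (k : String) : String := (PySem.List.pyGet? (pvSplitDot k) 0).getD ""

-- g.setdefault(key(k), []).append(k) over keys
def pvGroupBy (keys : List String) (key : String → String) : PySem.Dict String (List String) :=
  keys.foldl (fun d k => d.modify (key k) [] (· ++ [k])) PySem.Dict.empty

def group_keys_by_prefix_py_alt (keys : List String) (max_groups : Int) : List (String × List String) :=
  if (keys.length : Int) ≤ max_groups then
    (keys.foldl (fun d k => d.insert k [k]) PySem.Dict.empty).items
  else
    let g1 := pvGroupBy keys pvHeadDot
    if (g1.size : Int) ≤ max_groups then g1.items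
    else
      let byKey := pvGroupBy keys (fun k => k)
      let items := PySem.List.sorted byKey.items (fun kv => (kv.2.length : Int)) true
      let kept := pvDictOfPairs (PySem.List.slice items none (some (max_groups - 1)))
      (kept.insert "(others)" ((PySem.List.slice items (some (max_groups - 1)) none).flatMap (·.2))).items

-- ===== PRECONDITION & SPEC =====
-- Pre_ excludes only keys = [] with max_groups < 0, where A raises ValueError (max() of an empty sequence).
def Pre_group_keys_by_prefix_py (keys : List String) (max_groups : Int) : Prop :=
  keys ≠ [] ∨ 0 ≤ max_groups
instance (keys : List String) (max_groups : Int) : Decidable (Pre_group_keys_by_prefix_py keys max_groups) := by unfold Pre_group_keys_by_prefix_py; infer_instance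

def pvWitness_group_keys_by_prefix_py : List String × Int := (["a"], 0)

def Spec_group_keys_by_prefix_py (keys : List String) (max_groups : Int) (out : List (String × List String)) : Prop := out = group_keys_by_prefix_py_alt keys max_groups
instance (keys : List String) (max_groups : Int) (out : List (String × List String)) : Decidable (Spec_group_keys_by_prefix_py keys max_groups out) := by unfold Spec_group_keys_by_prefix_py; infer_instance

-- ===== CLAIM (what is proved, stated in full; the proofs are below) =====
def Claim_equal_group_keys_by_prefix_py : Prop := ∀ (keys : List String) (max_groups : Int), Dom_group_keys_by_prefix_py keys max_groups → Pre_group_keys_by_prefix_py keys max_groups → Spec_group_keys_by_prefix_py keys max_groups (group_keys_by_prefix_py keys max_groups)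

-- ===== LEMMAS AND PROOFS =====

-- A plain structural split on '.', used to reason about PySem's fuel-based splitOn.
def pvSp : List Char → List (List Char)
  | [] => [[]]
  | c :: rest => if c = '.' then [] :: pvSp rest else (pvSp rest).modifyHead (c :: ·)

theorem pvSp_ne_nil (l : List Char) : pvSp l ≠ [] := by
  cases l with
  | nil => simp [pvSp]
  | cons c rest =>
    simp only [pvSp]
    split_ifs
    · simp
    · cases h : pvSp rest with
      | nil => exact absurd h (pvSp_ne_nil rest)
      | cons a t => simp

theorem pvGo_eq : ∀ (fuel : Nat) (l cur : List Char) (acc : List (List Char)), l.length < fuel →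
    PySem.Chars.splitOn.go ['.'] fuel l cur acc
      = acc.reverse ++ (pvSp l).modifyHead (cur.reverse ++ ·) := by
  intro fuel
  induction fuel with
  | zero => intro l cur acc h; omega
  | succ f ih =>
    intro l cur acc h
    cases l with
    | nil =>
      rw [PySem.Chars.splitOn.go]
      simp [pvSp]
      omega
    | cons c rest =>
      rw [PySem.Chars.splitOn.go]
      by_cases hc : c = '.'
      · subst hc
        have hpre : List.isPrefixOf ['.'] ('.' :: rest) = true := by
          simp [List.isPrefixOf]
        rw [if_pos hpre]
        have hlen : rest.length < f := by simp only [List.length_cons] at h; omega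
        rw [show List.drop (['.'] : List Char).length ('.' :: rest) = rest from rfl]
        rw [ih rest [] (cur.reverse :: acc) hlen]
        cases hr : pvSp rest with
        | nil => exact absurd hr (pvSp_ne_nil rest)
        | cons a t => simp [pvSp, hr]
      · have hpre : List.isPrefixOf ['.'] (c :: rest) = false := by
          simp [List.isPrefixOf]
          intro hcc
          exact absurd hcc.symm hc
        rw [if_neg (by simp [hpre])]
        have hlen : rest.length < f := by simp only [List.length_cons] at h; omega
        rw [ih rest (c :: cur) acc hlen]
        cases hr : pvSp rest with
        | nil => exact absurd hr (pvSp_ne_nil rest)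
        | cons a t => simp [pvSp, hr, if_neg hc]

theorem pvSplitOn_eq_sp (cs : List Char) : PySem.Chars.splitOn cs ['.'] = pvSp cs := by
  unfold PySem.Chars.splitOn
  rw [pvGo_eq (cs.length + 1) cs [] [] (by omega)]
  cases hr : pvSp cs with
  | nil => exact absurd hr (pvSp_ne_nil cs)
  | cons a t => simp

theorem pvSp_dotfree (l : List Char) : ∀ p ∈ pvSp l, ('.' : Char) ∉ p := by
  induction l with
  | nil => simp [pvSp]
  | cons c rest ih =>
    intro p hp
    by_cases hc : c = '.'
    · subst hc
      simp only [pvSp, reduceIte] at hp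
      cases List.mem_cons.mp hp with
      | inl h => simp [h]
      | inr h => exact ih p h
    · simp only [pvSp, if_neg hc] at hp
      cases hr : pvSp rest with
      | nil => exact absurd hr (pvSp_ne_nil rest)
      | cons a t =>
        rw [hr] at hp
        simp only [List.modifyHead] at hp
        cases List.mem_cons.mp hp with
        | inl h =>
          rw [h]
          intro hmem
          cases List.mem_cons.mp hmem with
          | inl h1 => exact hc h1.symm
          | inr h1 => exact ih a (by rw [hr]; exact List.mem_cons_self) h1
        | inr h => exact ih p (by rw [hr]; exact List.mem_cons_of_mem _ h)

theorem pvSp_nodot (p : List Char) (hp : ('.' : Char) ∉ p) : pvSp p = [p] := by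
  induction p with
  | nil => rfl
  | cons c p' ih =>
    have hc : c ≠ '.' := fun h => hp (by simp [h])
    have hp' : ('.' : Char) ∉ p' := fun h => hp (List.mem_cons_of_mem _ h)
    simp [pvSp, hc, ih hp']

theorem pvSp_append_dot (p t : List Char) (hp : ('.' : Char) ∉ p) :
    pvSp (p ++ '.' :: t) = p :: pvSp t := by
  induction p with
  | nil => simp [pvSp]
  | cons c p' ih =>
    have hc : c ≠ '.' := fun h => hp (by simp [h])
    have hp' : ('.' : Char) ∉ p' := fun h => hp (List.mem_cons_of_mem _ h)
    simp [pvSp, hc, ih hp']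

theorem pvSp_intercalate (ls : List (List Char)) (hne : ls ≠ [])
    (hdf : ∀ p ∈ ls, ('.' : Char) ∉ p) :
    pvSp (PySem.Chars.join ['.'] ls) = ls := by
  induction ls with
  | nil => exact absurd rfl hne
  | cons p rest ih =>
    cases rest with
    | nil =>
      rw [PySem.Chars.join_singleton]
      exact pvSp_nodot p (hdf p List.mem_cons_self)
    | cons q rest' =>
      rw [PySem.Chars.join_cons_cons]
      have hj : p ++ ['.'] ++ PySem.Chars.join ['.'] (q :: rest')
          = p ++ '.' :: PySem.Chars.join ['.'] (q :: rest') := by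
        simp
      rw [hj, pvSp_append_dot _ _ (hdf p List.mem_cons_self)]
      rw [ih (by simp) (fun x hx => hdf x (List.mem_cons_of_mem _ hx))]

theorem pvSplitDot_eq (k : String) : pvSplitDot k = (pvSp k.toList).map String.ofList := by
  unfold pvSplitDot; rw [pvSplitOn_eq_sp]

theorem pvSplitDot_ne_nil (k : String) : pvSplitDot k ≠ [] := by
  rw [pvSplitDot_eq]
  intro h
  exact pvSp_ne_nil _ (List.map_eq_nil_iff.mp h)

-- f1: the depth-1 prefix key
theorem pvJoin_singleton (q0 : String) : PySem.Str.join "." [q0] = q0 := by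
  apply String.toList_inj.mp
  rw [PySem.Str.toList_join]
  simp only [List.map_cons, List.map_nil]
  exact PySem.Chars.join_singleton _ _

theorem pvF1_of_cons (x q0 : String) (qs : List String) (h : pvSplitDot x = q0 :: qs) :
    pvPrefixA x (pvSplitDot x) 1 = q0 := by
  unfold pvPrefixA
  rw [h, if_pos (by simp only [List.length_cons]; push_cast; omega)]
  rw [PySem.List.slice_to _ (by norm_num)]
  simp only [Int.toNat_one, List.take_succ_cons, List.take_zero]
  exact pvJoin_singleton q0

-- monotonicity at the level of keys: the depth-1 key of the depth-d prefix is the depth-1 key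
theorem pvMono_pointwise (k : String) (d : Int) (hd : 1 ≤ d) :
    pvPrefixA (pvPrefixA k (pvSplitDot k) d) (pvSplitDot (pvPrefixA k (pvSplitDot k) d)) 1
      = pvPrefixA k (pvSplitDot k) 1 := by
  by_cases hlen : d ≤ ((pvSplitDot k).length : Int)
  · obtain ⟨p0, ps', hps⟩ : ∃ p0 ps', pvSp k.toList = p0 :: ps' := by
      cases hr : pvSp k.toList with
      | nil => exact absurd hr (pvSp_ne_nil _)
      | cons a t => exact ⟨a, t, rfl⟩
    obtain ⟨nm, hnm⟩ : ∃ nm, d.toNat = nm + 1 := ⟨d.toNat - 1, by omega⟩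
    have hpref : pvPrefixA k (pvSplitDot k) d
        = PySem.Str.join "." ((pvSplitDot k).take d.toNat) := by
      unfold pvPrefixA
      rw [if_pos hlen, PySem.List.slice_to _ (by omega)]
    have htake : (pvSplitDot k).take d.toNat = ((pvSp k.toList).take d.toNat).map String.ofList := by
      rw [pvSplitDot_eq, List.map_take]
    have htl : (PySem.Str.join "." ((pvSplitDot k).take d.toNat)).toList
        = PySem.Chars.join ['.'] ((pvSp k.toList).take d.toNat) := by
      rw [PySem.Str.toList_join, htake, List.map_map,
        (by decide : ".".toList = ['.'])]
      congr 1
      simp [Function.comp_def, String.toList_ofList]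
    have hsplit : pvSplitDot (pvPrefixA k (pvSplitDot k) d)
        = ((pvSp k.toList).take d.toNat).map String.ofList := by
      rw [hpref, pvSplitDot_eq, htl, pvSp_intercalate]
      · rw [hps, hnm]
        simp
      · intro p hp
        exact pvSp_dotfree k.toList p (List.mem_of_mem_take hp)
    have hsplit' : pvSplitDot (pvPrefixA k (pvSplitDot k) d)
        = String.ofList p0 :: (ps'.take nm).map String.ofList := by
      rw [hsplit, hps, hnm, List.take_succ_cons, List.map_cons]
    rw [pvF1_of_cons _ _ _ hsplit']
    rw [pvF1_of_cons k (String.ofList p0) (ps'.map String.ofList)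
      (by rw [pvSplitDot_eq, hps, List.map_cons])]
  · unfold pvPrefixA
    rw [if_neg hlen]

-- counting distinct keys
def pvCnt (keys : List String) (key : String → String) : Nat :=
  (PySem.Set.ofList (keys.map key)).length

theorem pvLen_ofList_eq_card (xs : List String) : (PySem.Set.ofList xs).length = xs.toFinset.card := by
  have h1 : (PySem.Set.ofList xs : List String).toFinset = xs.toFinset := by
    ext a
    simp [List.mem_toFinset, PySem.Set.mem_ofList]
  rw [← h1, List.toFinset_card_of_nodup (PySem.Set.nodup_ofList xs)]

theorem pvCnt_mono (keys : List String) (f g : String → String)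
    (h : ∀ k, g (f k) = g k) : pvCnt keys g ≤ pvCnt keys f := by
  unfold pvCnt
  rw [pvLen_ofList_eq_card, pvLen_ofList_eq_card]
  have hmap : keys.map g = (keys.map f).map g := by
    rw [List.map_map]
    exact List.map_congr_left fun k _ => (h k).symm
  rw [hmap]
  have himg : ((keys.map f).map g).toFinset = (keys.map f).toFinset.image g := by
    ext a
    simp
  rw [himg]
  exact Finset.card_image_le

theorem pvSize_groupBy (keys : List String) (key : String → String) :
    (pvGroupBy keys key).size = pvCnt keys key := by
  have hk := PySem.Dict.keys_foldl_modify_key keys key ([] : List String)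
    (fun _ k => (· ++ [k])) PySem.Dict.empty
  have hlen : (pvGroupBy keys key).size = (pvGroupBy keys key).keys.length := by
    simp [PySem.Dict.keys, PySem.Dict.size]
  rw [hlen]
  unfold pvGroupBy
  rw [hk]
  rfl

-- A's zip-fold is a pvGroupBy
theorem pvZip_map_self {α β : Type} (f : α → β) : ∀ (l : List α),
    l.zip (l.map f) = l.map fun a => (a, f a)
  | [] => rfl
  | a :: t => by simp [pvZip_map_self f t]

theorem pvGroupsA_eq (keys : List String) (d : Int) :
    (keys.zip (keys.map pvSplitDot)).foldl
      (fun dd kp => dd.modify (pvPrefixA kp.1 kp.2 d) [] (· ++ [kp.1])) PySem.Dict.empty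
    = pvGroupBy keys (fun k => pvPrefixA k (pvSplitDot k) d) := by
  rw [pvZip_map_self, List.foldl_map]
  rfl

def pvMergeA (byKey : PySem.Dict String (List String)) (max_groups : Int) : List (String × List String) :=
  let items := PySem.List.sorted byKey.items (fun kv => (kv.2.length : Int)) true
  let kept := pvDictOfPairs (PySem.List.slice items none (some (max_groups - 1)))
  let merged := (PySem.List.slice items (some (max_groups - 1)) none).foldl
      (fun acc kv => acc ++ kv.2) ([] : List String)
  (kept.insert "(others)" merged).items

theorem pvLoopA_run (keys : List String) (mg m : Int)
    (hm : PySem.List.max? ((keys.map pvSplitDot).map fun p => (p.length : Int)) (fun x => x) = some m)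
    (hub : ∀ k ∈ keys, ((pvSplitDot k).length : Int) ≤ m)
    (hc1 : mg < (pvCnt keys (fun k => pvPrefixA k (pvSplitDot k) 1) : Int)) :
    ∀ (n : Nat) (d : Int), 1 ≤ d → d ≤ m + 1 → (m + 1 - d).toNat = n →
    pvLoopA keys (keys.map pvSplitDot) mg d = pvMergeA (pvGroupBy keys (fun k => k)) mg := by
  intro n
  induction n with
  | zero =>
    intro d h1 h2 h0
    have hd : d = m + 1 := by omega
    subst hd
    rw [pvLoopA]
    simp only [pvGroupsA_eq]
    rw [if_neg (by
      rw [pvSize_groupBy]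
      have := pvCnt_mono keys (fun k => pvPrefixA k (pvSplitDot k) (m + 1))
        (fun k => pvPrefixA k (pvSplitDot k) 1)
        (fun k => pvMono_pointwise k (m + 1) (by omega))
      omega)]
    rw [hm]
    simp only [if_pos (by omega : m < m + 1)]
    have hgrp : pvGroupBy keys (fun k => pvPrefixA k (pvSplitDot k) (m + 1))
        = pvGroupBy keys (fun k => k) := by
      unfold pvGroupBy
      apply PySem.List.foldl_congr_mem
      intro acc k hk
      have h : pvPrefixA k (pvSplitDot k) (m + 1) = k := by
        unfold pvPrefixA
        rw [if_neg (by have := hub k hk; omega)]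
      dsimp only
      rw [h]
    rw [hgrp]
    rfl
  | succ n ih =>
    intro d h1 h2 h0
    rw [pvLoopA]
    simp only [pvGroupsA_eq]
    rw [if_neg (by
      rw [pvSize_groupBy]
      have := pvCnt_mono keys (fun k => pvPrefixA k (pvSplitDot k) d)
        (fun k => pvPrefixA k (pvSplitDot k) 1)
        (fun k => pvMono_pointwise k d h1)
      omega)]
    rw [hm]
    simp only [if_neg (by omega : ¬ m < d)]
    exact ih (d + 1) (by omega) (by omega) (by omega)

-- ===== VERDICT (by name: the statement is the Claim_ definition above) =====
theorem pvHeadDot_eq (k : String) : pvHeadDot k = pvPrefixA k (pvSplitDot k) 1 := by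
  obtain ⟨q0, qs, hq⟩ : ∃ q0 qs, pvSplitDot k = q0 :: qs := by
    cases hr : pvSplitDot k with
    | nil => exact absurd hr (pvSplitDot_ne_nil k)
    | cons a t => exact ⟨a, t, rfl⟩
  rw [pvF1_of_cons k q0 qs hq]
  unfold pvHeadDot
  rw [hq, (by rfl : (0 : Int) = ((0 : Nat) : Int)), PySem.List.pyGet?_natCast]
  rfl

theorem group_keys_by_prefix_py_spec : Claim_equal_group_keys_by_prefix_py := by
  unfold Claim_equal_group_keys_by_prefix_py
  intro keys mg _ hpre
  unfold Spec_group_keys_by_prefix_py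
  by_cases hlen : ((keys.length : Int) ≤ mg)
  · simp only [group_keys_by_prefix_py, group_keys_by_prefix_py_alt, if_pos hlen]
  · have hk : keys ≠ [] := by
      intro h
      subst h
      rcases hpre with h | h
      · exact h rfl
      · simp at hlen
        omega
    obtain ⟨k0, ks, hkk⟩ := List.exists_cons_of_ne_nil hk
    obtain ⟨m, hm⟩ : ∃ m, PySem.List.max?
        ((keys.map pvSplitDot).map fun p => (p.length : Int)) (fun x => x) = some m := by
      cases hmx : PySem.List.max?
          ((keys.map pvSplitDot).map fun p => (p.length : Int)) (fun x => x) with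
      | none =>
        rw [PySem.List.max?_eq_none_iff] at hmx
        rw [hkk] at hmx
        simp at hmx
      | some m => exact ⟨m, rfl⟩
    have hub : ∀ k ∈ keys, ((pvSplitDot k).length : Int) ≤ m := by
      intro k hkm
      exact PySem.List.max?_isMax hm _ (by
        simp only [List.mem_map]
        exact ⟨pvSplitDot k, ⟨k, hkm, rfl⟩, rfl⟩)
    have hm1 : 1 ≤ m := by
      have hmem := PySem.List.max?_mem hm
      simp only [List.mem_map] at hmem
      obtain ⟨p, ⟨k, _, rfl⟩, rfl⟩ := hmem
      have : pvSplitDot k ≠ [] := pvSplitDot_ne_nil k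
      have : 0 < (pvSplitDot k).length := List.length_pos_iff.mpr this
      omega
    have hg1 : pvGroupBy keys pvHeadDot = pvGroupBy keys (fun k => pvPrefixA k (pvSplitDot k) 1) := by
      unfold pvGroupBy
      apply PySem.List.foldl_congr_mem
      intro acc k _
      rw [pvHeadDot_eq]
    simp only [group_keys_by_prefix_py, group_keys_by_prefix_py_alt, if_neg hlen]
    rw [hg1]
    by_cases hc1 : ((pvGroupBy keys (fun k => pvPrefixA k (pvSplitDot k) 1)).size : Int) ≤ mg
    · rw [if_pos hc1]
      rw [pvLoopA]
      simp only [pvGroupsA_eq]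
      rw [if_pos hc1]
    · rw [if_neg hc1]
      have hcnt : mg < (pvCnt keys (fun k => pvPrefixA k (pvSplitDot k) 1) : Int) := by
        rw [pvSize_groupBy] at hc1
        omega
      rw [pvLoopA_run keys mg m hm hub hcnt (m + 1 - 1).toNat 1 (by omega) (by omega) rfl]
      unfold pvMergeA
      simp only [PySem.List.foldl_append_eq_flatMap]
      rfl
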